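-- pv_equiv track=rewrite | github.com/suminS2sumin/Programmers | 프로그래머스/0/181918. 배열 만들기 4/배열 만들기 4.py | solution
-- ===== SOURCE A (Python) =====
-- def solution(arr):
--     stk = []
--     i = 0
--     while i < len(arr):
--         if not stk or stk and stk[-1] < arr[i]:
--             stk += [arr[i]]
--             i += 1
--         else:
--             stk.pop(-1)
--
--     return stk
-- ===== SOURCE B (Python) =====
-- def solution(arr):
--     # Right-to-left suffix-minimum scan: an element survives A's stack
--     # iff it is strictly smaller than every element after it.
--     out = []
--     for x in reversed(arr):
--         if not out or x < out[-1]: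
--             out.append(x)
--     return out[::-1]
-- ===== Notes on version B (the rewrite author's own statement) =====
-- stated objective: alternative
-- what changed: Replaces A's push/pop monotonic stack (index-driven while loop that repeatedly pops the top while it is >= the current element) with a pop-free right-to-left suffix-minimum scan: an element survives A's stack exactly when it is strictly smaller than every element after it, so one backward pass appending only strict new minima, reversed at the end, yields the same list with nothing ever removed.
import Mathlib
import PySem

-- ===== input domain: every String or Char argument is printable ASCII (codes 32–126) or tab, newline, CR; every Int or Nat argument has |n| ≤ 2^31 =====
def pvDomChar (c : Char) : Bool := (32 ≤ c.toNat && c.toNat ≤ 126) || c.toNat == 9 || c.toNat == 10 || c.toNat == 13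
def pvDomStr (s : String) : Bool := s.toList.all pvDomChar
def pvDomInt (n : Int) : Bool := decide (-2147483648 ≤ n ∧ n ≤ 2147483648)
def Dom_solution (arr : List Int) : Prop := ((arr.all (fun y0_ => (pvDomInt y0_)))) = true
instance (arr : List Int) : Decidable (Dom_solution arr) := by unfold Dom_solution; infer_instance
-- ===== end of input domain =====

-- ===== PORT A =====
-- B replaces A's push/pop stack loop by a pop-free right-to-left suffix-minimum scan; simpler, same cost.
-- Literal transliteration of A's while loop: state (stk, i); pop does not advance i.
def solutionLoop (arr : List Int) (stk : List Int) (i : Nat) : List Int :=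
  if _h : i < arr.length then
    match _hl : stk.getLast? with
    | none => solutionLoop arr (stk ++ [arr[i]]) (i + 1)
    | some t =>
        if t < arr[i] then solutionLoop arr (stk ++ [arr[i]]) (i + 1)
        else solutionLoop arr stk.dropLast i
  else stk
termination_by 2 * (arr.length - i) + stk.length
decreasing_by
  · simp; omega
  · simp; omega
  · have : stk ≠ [] := by intro h; simp [h] at _hl
    have : 0 < stk.length := List.length_pos_of_ne_nil this
    simp [List.length_dropLast]; omega

def solution (arr : List Int) : List Int := solutionLoop arr [] 0

-- ===== PORT B =====
-- Transliteration of Source B: one backward pass appending only strict new minima, then reverse.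
def solution_alt (arr : List Int) : List Int :=
  (arr.reverse.foldl (fun out x =>
      match out.getLast? with
      | none => out ++ [x]
      | some m => if x < m then out ++ [x] else out) []).reverse

-- ===== PRECONDITION & SPEC =====
def Spec_solution (arr : List Int) (out : List Int) : Prop := out = solution_alt arr
instance (arr : List Int) (out : List Int) : Decidable (Spec_solution arr out) := by unfold Spec_solution; infer_instance

-- ===== CLAIM (what is proved, stated in full; the proofs are below) =====
def Claim_equal_solution : Prop := ∀ (arr : List Int), Dom_solution arr → Spec_solution arr (solution arr)

-- ===== LEMMAS AND PROOFS =====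

-- proof helper: A's pop phase (drop trailing elements >= x), used only to factor A's loop
def popA (stk : List Int) (x : Int) : List Int :=
  match _hl : stk.getLast? with
  | some t => if x <= t then popA stk.dropLast x else stk
  | none => stk
termination_by stk.length
decreasing_by
  have : stk ≠ [] := by intro h; simp [h] at _hl
  have : 0 < stk.length := List.length_pos_of_ne_nil this
  simp [List.length_dropLast]; omega

-- proof helper: B's step, viewed on the reversed (front-growing) accumulator
def stepB (x : Int) (acc : List Int) : List Int :=
  match acc.head? with
  | none => x :: acc
  | some m => if x < m then x :: acc else acc

theorem popA_nil (y : Int) : popA [] y = [] := by rw [popA]; rfl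

theorem popA_last_lt (stk : List Int) (x t : Int) (hl : stk.getLast? = some t)
    (h : t < x) : popA stk x = stk := by
  rw [popA, hl]
  simp [not_le.mpr h]

theorem popA_last_ge (stk : List Int) (x t : Int) (hl : stk.getLast? = some t)
    (h : x <= t) : popA stk x = popA stk.dropLast x := by
  rw [popA, hl]
  simp [h]

theorem popA_singleton (x y : Int) : popA [x] y = if y <= x then [] else [x] := by
  by_cases h : y <= x
  · rw [if_pos h, popA_last_ge [x] y x rfl h]
    simp [popA_nil]
  · rw [if_neg h, popA_last_lt [x] y x rfl (by omega)]

theorem popA_concat (init : List Int) (t y : Int) :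
    popA (init ++ [t]) y = if y <= t then popA init y else init ++ [t] := by
  by_cases h : y <= t
  · rw [if_pos h, popA_last_ge (init ++ [t]) y t List.getLast?_concat h,
      List.dropLast_concat]
  · rw [if_neg h, popA_last_lt (init ++ [t]) y t List.getLast?_concat (by omega)]

theorem popA_cons (S : List Int) (m y : Int) :
    popA (m :: S) y = if popA S y = [] then popA [m] y else m :: popA S y := by
  induction S using List.reverseRecOn with
  | nil => simp [popA_nil]
  | append_singleton init t ih =>
      have hms : m :: (init ++ [t]) = (m :: init) ++ [t] := by simp
      by_cases hyt : y <= t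
      · rw [hms, popA_concat (m :: init) t y, if_pos hyt, popA_concat init t y, if_pos hyt, ih]
      · rw [hms, popA_concat (m :: init) t y, if_neg hyt, popA_concat init t y, if_neg hyt,
          if_neg (by simp), hms]

theorem popA_head (S : List Int) (y : Int) (h : popA S y ≠ []) :
    (popA S y).head? = S.head? := by
  cases S with
  | nil => simp [popA_nil] at h
  | cons m S' =>
      rw [popA_cons] at h ⊢
      by_cases hc : popA S' y = []
      · rw [if_pos hc] at h ⊢
        rw [popA_singleton] at h ⊢
        by_cases hym : y <= m
        · rw [if_pos hym] at h; exact absurd rfl h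
        · rw [if_neg hym]; rfl
      · rw [if_neg hc] at h ⊢; rfl

theorem popA_eq_nil_head (S : List Int) (m y : Int) (hh : S.head? = some m)
    (h : popA S y = []) : y <= m := by
  cases S with
  | nil => simp at hh
  | cons a S' =>
      have ham : a = m := by simpa using hh
      rw [ham] at h
      rw [popA_cons] at h
      by_cases hc : popA S' y = []
      · rw [if_pos hc, popA_singleton] at h
        by_cases hym : y <= m
        · exact hym
        · rw [if_neg hym] at h; simp at h
      · rw [if_neg hc] at h; simp at h

-- the heart: B's "push iff strict new minimum" step commutes with A's pop-then-push step
theorem stepB_popA (S : List Int) (x y : Int) :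
    stepB x (popA S y ++ [y]) = popA (stepB x S) y ++ [y] := by
  have hsy : stepB x [y] = if x < y then [x, y] else [y] := by unfold stepB; rfl
  cases S with
  | nil =>
      rw [popA_nil, List.nil_append, show stepB x [] = [x] from rfl, hsy, popA_singleton]
      by_cases hxy : x < y
      · rw [if_pos hxy, if_neg (by omega)]; rfl
      · rw [if_neg hxy, if_pos (by omega)]; rfl
  | cons m S' =>
      have hstepS : stepB x (m :: S') = if x < m then x :: m :: S' else m :: S' := by
        unfold stepB; rfl
      by_cases hP : popA (m :: S') y = []
      · have hym : y <= m := popA_eq_nil_head _ m y rfl hP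
        rw [hP, List.nil_append, hsy, hstepS]
        by_cases hxm : x < m
        · rw [if_pos hxm, popA_cons (m :: S') x y, if_pos hP, popA_singleton]
          by_cases hxy : x < y
          · rw [if_pos hxy, if_neg (by omega)]; rfl
          · rw [if_neg hxy, if_pos (by omega)]; rfl
        · rw [if_neg hxm, hP, if_neg (by omega)]; rfl
  
      · obtain ⟨a, P', hPe⟩ : ∃ a P', popA (m :: S') y = a :: P' := by
          cases hE : popA (m :: S') y with
          | nil => exact absurd hE hP
          | cons a P' => exact ⟨a, P', rfl⟩
        have ham : a = m := by
          have := popA_head (m :: S') y hP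
          rw [hPe] at this; simpa using this
        rw [ham] at hPe
        have hL : stepB x (popA (m :: S') y ++ [y])
            = if x < m then x :: (popA (m :: S') y ++ [y]) else popA (m :: S') y ++ [y] := by
          rw [hPe]; unfold stepB; rfl
        rw [hL, hstepS]
        by_cases hxm : x < m
        · rw [if_pos hxm, if_pos hxm, popA_cons (m :: S') x y, if_neg hP]; rfl
        · rw [if_neg hxm, if_neg hxm]

theorem foldr_stepB_concat (xs : List Int) (y : Int) :
    xs.foldr stepB [y] = popA (xs.foldr stepB []) y ++ [y] := by
  induction xs with
  | nil => simp [popA_nil]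
  | cons x xs ih =>
      simp only [List.foldr_cons, ih]
      exact stepB_popA (xs.foldr stepB []) x y

-- A's loop as a left fold of (pop, then push)
theorem solutionLoop_eq_foldl (arr stk : List Int) (i : Nat) :
    solutionLoop arr stk i = (arr.drop i).foldl (fun stk x => popA stk x ++ [x]) stk := by
  induction stk, i using solutionLoop.induct arr with
  | case1 stk i h hl ih =>
      rw [solutionLoop, dif_pos h]
      split
      next heq =>
        have hstk : stk = [] := List.getLast?_eq_none_iff.mp heq
        rw [ih, List.drop_eq_getElem_cons h, hstk]
        simp only [List.foldl_cons, popA_nil, List.nil_append]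
      next t heq => rw [hl] at heq; cases heq
  | case2 stk i h t hl hlt ih =>
      rw [solutionLoop, dif_pos h]
      split
      next heq => rw [hl] at heq; cases heq
      next t' heq =>
        rw [hl] at heq
        have heq' : t' = t := by injection heq.symm
        rw [heq', if_pos hlt, ih, List.drop_eq_getElem_cons h]
        simp only [List.foldl_cons]
        rw [popA_last_lt stk arr[i] t hl hlt]
  | case3 stk i h t hl hge ih =>
      rw [solutionLoop, dif_pos h]
      split
      next heq => rw [hl] at heq; cases heq
      next t' heq =>
        rw [hl] at heq
        have heq' : t' = t := by injection heq.symm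
        rw [heq', if_neg hge, ih, List.drop_eq_getElem_cons h]
        simp only [List.foldl_cons]
        rw [popA_last_ge stk arr[i] t hl (not_lt.mp hge)]
  | case4 stk i h =>
      rw [solutionLoop, dif_neg h, List.drop_of_length_le (by omega)]
      rfl

theorem A_eq_foldr (arr : List Int) : solution arr = arr.foldr stepB [] := by
  unfold solution
  rw [solutionLoop_eq_foldl, List.drop_zero]
  induction arr using List.reverseRecOn with
  | nil => rfl
  | append_singleton xs y ih =>
      rw [List.foldl_append, ih, List.foldl_cons, List.foldl_nil,
        List.foldr_append, List.foldr_cons, List.foldr_nil,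
        show stepB y [] = [y] from rfl, foldr_stepB_concat]

theorem B_rev_foldl (l out : List Int) :
    (l.foldl (fun out x =>
      match out.getLast? with
      | none => out ++ [x]
      | some m => if x < m then out ++ [x] else out) out).reverse
    = l.foldl (fun r x => stepB x r) out.reverse := by
  induction l generalizing out with
  | nil => rfl
  | cons x l ih =>
      simp only [List.foldl_cons]
      rw [ih]
      congr 1
      unfold stepB
      rw [← List.head?_reverse]
      cases h : out.reverse.head? with
      | none => simp
      | some m => by_cases hx : x < m <;> simp [hx]

theorem B_eq_foldr (arr : List Int) : solution_alt arr = arr.foldr stepB [] := by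
  unfold solution_alt
  rw [B_rev_foldl, List.reverse_nil, List.foldl_reverse]

-- ===== VERDICT (by name: the statement is the Claim_ definition above) =====
theorem solution_spec : Claim_equal_solution := by
  intro arr _
  unfold Spec_solution
  rw [A_eq_foldr, B_eq_foldr]
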